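-- pv_equiv track=rewrite | github.com/c-lamd/stock-img-generator | template_engine.py | _parse_template_text
-- ===== SOURCE A (Python) =====
-- def _parse_template_text(text, source_path):
--     """Parse ## key: value header lines and return (metadata_dict, body_str).
--
--     Header lines start with '##'. A blank line terminates the header block.
--     Everything after the header block is the body (stripped).
--     """
--     metadata = {}
--     lines = text.splitlines()
--     body_lines = []
--     in_header = True
--
--     for line in lines:
--         if in_header:
--             if line.startswith("##"):
--                 # Parse 'key: value' after the '##' prefix
--                 content = line[2:].strip()
--                 if ":" in content:
--                     key, _, value = content.partition(":")
--                     metadata[key.strip()] = value.strip()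
--             elif line.strip() == "":
--                 # First blank line ends header block
--                 in_header = False
--             else:
--                 # Non-header, non-blank line ends header block
--                 in_header = False
--                 body_lines.append(line)
--         else:
--             body_lines.append(line)
--
--     body = "\n".join(body_lines).strip()
--     return metadata, body
-- ===== SOURCE B (Python) =====
-- def _parse_template_text(text, source_path):
--     """Locate the header/body boundary first, then parse the two parts separately."""
--     lines = text.splitlines()
--     i = 0
--     while i < len(lines) and lines[i].startswith("##"):
--         i += 1
--
--     metadata = {}
--     for line in lines[:i]:
--         content = line[2:].strip()
--         if ":" in content:
--             key, _, value = content.partition(":")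
--             metadata[key.strip()] = value.strip()
--
--     tail = lines[i:]
--     if not tail:
--         body_lines = []
--     elif tail[0].strip() == "":
--         body_lines = tail[1:]
--     else:
--         body_lines = tail
--
--     return metadata, "\n".join(body_lines).strip()
-- ===== Notes on version B (the rewrite author's own statement) =====
-- stated objective: simpler
-- what changed: Replaces the single stateful in_header loop over all lines with a locate-the-boundary-then-partition decomposition: find the first non-'##' line, parse metadata from the prefix, and take the body from the tail (skipping one blank boundary line).
import Mathlib
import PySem

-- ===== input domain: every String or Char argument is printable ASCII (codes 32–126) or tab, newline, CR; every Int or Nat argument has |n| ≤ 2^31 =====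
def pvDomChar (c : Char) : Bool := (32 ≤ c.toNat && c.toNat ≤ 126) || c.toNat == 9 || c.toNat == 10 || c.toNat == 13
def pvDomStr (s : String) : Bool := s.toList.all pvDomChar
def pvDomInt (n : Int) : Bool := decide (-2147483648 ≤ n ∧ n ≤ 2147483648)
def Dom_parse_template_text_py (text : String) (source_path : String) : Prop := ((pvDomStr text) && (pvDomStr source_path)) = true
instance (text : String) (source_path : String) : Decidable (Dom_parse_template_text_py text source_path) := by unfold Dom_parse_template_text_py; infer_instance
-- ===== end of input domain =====

-- B replaces A's single stateful in_header loop by locate-the-boundary-then-partition (objective: simpler decomposition).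
-- ===== PORT A =====
-- hand port of Python's content.partition(":") (single-char separator), returning (before, after);
-- exact: splits at the FIRST ':' (both call sites guard on ':' being present, where the middle component is ":")
def pvPartitionColon (content : String) : String × String :=
  let cs := content.toList
  (String.ofList (cs.takeWhile (fun c => !(c == ':'))),
   String.ofList ((cs.dropWhile (fun c => !(c == ':'))).drop 1))

-- the body of A's for-loop, state = (metadata, body_lines, in_header)
def pvStepA (st : PySem.Dict String String × List String × Bool) (line : String) :
    PySem.Dict String String × List String × Bool :=
  let (metadata, body_lines, in_header) := st
  if in_header then
    if PySem.Str.startswith line "##" then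
      let content := PySem.Str.strip (PySem.Str.slice line (some 2) none)
      if PySem.Str.isIn ":" content then
        let kv := pvPartitionColon content
        (metadata.insert (PySem.Str.strip kv.1) (PySem.Str.strip kv.2), body_lines, true)
      else (metadata, body_lines, true)
    else if PySem.Str.strip line == "" then (metadata, body_lines, false)
    else (metadata, body_lines ++ [line], false)
  else (metadata, body_lines ++ [line], false)

def parse_template_text_py (text : String) (source_path : String) : (List (String × String)) × String :=
  let lines := PySem.Str.splitlines text
  let st := lines.foldl pvStepA (PySem.Dict.empty, [], true)
  (st.1.items, PySem.Str.strip (PySem.Str.join "\n" st.2.1))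

-- ===== PORT B =====
-- B's while loop: length of the leading run of '##' lines
def pvHdrLen : List String → Nat
  | [] => 0
  | l :: t => if PySem.Str.startswith l "##" then pvHdrLen t + 1 else 0

-- the body of B's metadata for-loop
def pvMdStep (md : PySem.Dict String String) (line : String) : PySem.Dict String String :=
  let content := PySem.Str.strip (PySem.Str.slice line (some 2) none)
  if PySem.Str.isIn ":" content then
    let kv := pvPartitionColon content
    md.insert (PySem.Str.strip kv.1) (PySem.Str.strip kv.2)
  else md

def parse_template_text_py_alt (text : String) (source_path : String) : (List (String × String)) × String :=
  let lines := PySem.Str.splitlines text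
  let i := pvHdrLen lines
  let metadata := (PySem.List.slice lines none (some (i : Int))).foldl pvMdStep PySem.Dict.empty
  let tail := PySem.List.slice lines (some (i : Int)) none
  let body_lines :=
    match tail with
    | [] => ([] : List String)
    | b :: rest => if PySem.Str.strip b == "" then rest else b :: rest
  (metadata.items, PySem.Str.strip (PySem.Str.join "\n" body_lines))

-- ===== PRECONDITION & SPEC =====
def Spec_parse_template_text_py (text : String) (source_path : String) (out : (List (String × String)) × String) : Prop := out = parse_template_text_py_alt text source_path
instance (text : String) (source_path : String) (out : (List (String × String)) × String) : Decidable (Spec_parse_template_text_py text source_path out) := by unfold Spec_parse_template_text_py; infer_instance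

-- ===== CLAIM (what is proved, stated in full; the proofs are below) =====
def Claim_equal_parse_template_text_py : Prop := ∀ (text : String) (source_path : String), Dom_parse_template_text_py text source_path → Spec_parse_template_text_py text source_path (parse_template_text_py text source_path)

-- ===== LEMMAS AND PROOFS =====
-- B's shape of the body lines, as a function (used only in the proofs)
def pvBodyOf : List String → List String
  | [] => []
  | b :: rest => if PySem.Str.strip b == "" then rest else b :: rest

theorem pvStepA_false (ls : List String) (md : PySem.Dict String String) :
    ∀ body, ls.foldl pvStepA (md, body, false) = (md, body ++ ls, false) := by
  induction ls with
  | nil => intro body; simp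
  | cons l t ih =>
      intro body
      simp only [List.foldl_cons, pvStepA, Bool.false_eq_true, if_false, ih (body ++ [l]),
        List.append_assoc, List.singleton_append]

theorem pvStepA_hdr (md : PySem.Dict String String) (body : List String) (line : String)
    (h : PySem.Str.startswith line "##" = true) :
    pvStepA (md, body, true) line = (pvMdStep md line, body, true) := by
  simp only [pvStepA, pvMdStep, h, if_true]
  split <;> rfl

theorem pvStepA_blank (md : PySem.Dict String String) (body : List String) (l : String)
    (h1 : PySem.Str.startswith l "##" = false) (h2 : (PySem.Str.strip l == "") = true) :
    pvStepA (md, body, true) l = (md, body, false) := by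
  simp only [pvStepA, h1, h2]; simp

theorem pvStepA_nonblank (md : PySem.Dict String String) (body : List String) (l : String)
    (h1 : PySem.Str.startswith l "##" = false) (h2 : (PySem.Str.strip l == "") = false) :
    pvStepA (md, body, true) l = (md, body ++ [l], false) := by
  simp only [pvStepA, h1, h2]; simp

theorem pvLoopA (ls : List String) : ∀ md : PySem.Dict String String, ∃ flag,
    ls.foldl pvStepA (md, [], true) =
      ((ls.take (pvHdrLen ls)).foldl pvMdStep md, pvBodyOf (ls.drop (pvHdrLen ls)), flag) := by
  induction ls with
  | nil => intro md; exact ⟨true, by simp [pvHdrLen, pvBodyOf]⟩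
  | cons l t ih =>
      intro md
      cases hh : PySem.Str.startswith l "##" with
      | true =>
          obtain ⟨flag, hrec⟩ := ih (pvMdStep md l)
          refine ⟨flag, ?_⟩
          simp only [List.foldl_cons, pvStepA_hdr md [] l hh, hrec, pvHdrLen, hh]
          simp
      | false =>
          refine ⟨false, ?_⟩
          cases hb : (PySem.Str.strip l == "") with
          | true =>
              simp only [List.foldl_cons, pvStepA_blank md [] l hh hb, pvStepA_false t md [],
                pvHdrLen, hh, pvBodyOf]
              simp [hb]
          | false =>
              simp only [List.foldl_cons, pvStepA_nonblank md [] l hh hb,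
                pvHdrLen, hh, pvBodyOf]
              simp [hb]
              exact pvStepA_false t md [l]

-- ===== VERDICT (by name: the statement is the Claim_ definition above) =====
theorem parse_template_text_py_spec : Claim_equal_parse_template_text_py := by
  intro text source_path _
  unfold Spec_parse_template_text_py
  simp only [parse_template_text_py, parse_template_text_py_alt]
  obtain ⟨flag, h⟩ := pvLoopA (PySem.Str.splitlines text) PySem.Dict.empty
  rw [h, PySem.List.slice_to _ (Int.natCast_nonneg _), PySem.List.slice_from _ (Int.natCast_nonneg _)]
  simp only [Int.toNat_natCast]
  cases hd : (PySem.Str.splitlines text).drop (pvHdrLen (PySem.Str.splitlines text)) with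
  | nil => simp [pvBodyOf]
  | cons b rest => simp only [pvBodyOf]
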